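-- pv_equiv track=rewrite | github.com/haseebzeeshan2010/Codewars | bracket_duplicates.py | string_parse
-- ===== SOURCE A (Python) =====
-- def string_parse(strng):
--     if type(strng) != str: return "Please enter a valid string"
--
--     if strng == "": return ""
--
--     result = ""
--     count = 1
--     last_letter = strng[0]
--
--     for i in range(1, len(strng)+1):
--
--
--         if i < len(strng) and strng[i] == last_letter:
--             count += 1
--         else:
--
--             if count <= 2:
--                 result += last_letter * count
--             else:
--                 result += last_letter * 2 + "[" + last_letter * (count - 2) + "]"
--
--             if i < len(strng):
--                 last_letter = strng[i]
--                 count = 1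
--
--     return result
-- ===== SOURCE B (Python) =====
-- def string_parse(strng):
--     if type(strng) != str:
--         return "Please enter a valid string"
--     out = []
--     s = list(strng)
--     p3 = p2 = p1 = None
--     for idx, c in enumerate(s):
--         third = p1 == c and p2 == c
--         if third and p3 != c:
--             out.append('[')
--         out.append(c)
--         nxt = s[idx + 1] if idx + 1 < len(s) else None
--         if third and nxt != c:
--             out.append(']')
--         p3, p2, p1 = p2, p1, c
--     return ''.join(out)
-- ===== Notes on version B (the rewrite author's own statement) =====
-- stated objective: alternative
-- what changed: B never computes run lengths: a single sliding-window pass looks only at the two previous characters, the current one and the next, emitting the opening bracket locally before the third repeat and the closing bracket after the last repeat, instead of A's counter-and-flush run-length scan.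
import Mathlib
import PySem

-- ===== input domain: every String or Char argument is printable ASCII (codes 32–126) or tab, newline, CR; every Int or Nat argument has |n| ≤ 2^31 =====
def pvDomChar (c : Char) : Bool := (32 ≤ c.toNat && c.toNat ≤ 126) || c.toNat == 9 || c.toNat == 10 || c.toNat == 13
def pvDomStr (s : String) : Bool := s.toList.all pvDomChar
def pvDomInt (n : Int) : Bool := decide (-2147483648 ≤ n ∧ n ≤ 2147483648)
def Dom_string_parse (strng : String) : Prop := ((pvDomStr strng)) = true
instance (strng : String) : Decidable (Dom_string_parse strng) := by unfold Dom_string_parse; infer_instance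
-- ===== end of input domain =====

-- B replaces A's counter-and-flush run-length scan by a sliding-window pass that decides
-- each bracket locally from the two previous characters and the next one; objective: alternative.
-- (The Python type() guard is vacuous under the String-typed signature.)

-- ===== PORT A =====
-- formatting of one finished run: result += last*count  or  last*2 + "[" + last*(count-2) + "]"
def fmtA (c : Char) (k : Nat) : List Char :=
  if k ≤ 2 then List.replicate k c
  else List.replicate 2 c ++ '[' :: (List.replicate (k - 2) c ++ [']'])

-- the for-loop over i in range(1, len+1): `rest` is strng[i:]; nil = the final iteration i = len
def loopA (rest : List Char) (last : Char) (count : Nat) : List Char :=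
  match rest with
  | [] => fmtA last count
  | x :: xs =>
    if x == last then loopA xs last (count + 1)
    else fmtA last count ++ loopA xs x 1

def string_parse (strng : String) : String :=
  match strng.toList with
  | [] => ""                       -- if strng == "": return ""
  | h :: t => String.ofList (loopA t h 1)

-- ===== PORT B =====
-- the for-loop over enumerate(s): carries p3, p2, p1; `rest.head?` is the lookahead s[idx+1]
def loopB (p3 p2 p1 : Option Char) (rest : List Char) : List Char :=
  match rest with
  | [] => []
  | c :: xs =>
    let third := p1 == some c && p2 == some c
    (if third && p3 != some c then ['['] else []) ++
    [c] ++
    (if third && xs.head? != some c then [']'] else []) ++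
    loopB p2 p1 (some c) xs

def string_parse_alt (strng : String) : String :=
  String.ofList (loopB none none none strng.toList)

-- ===== PRECONDITION & SPEC =====
def Spec_string_parse (strng : String) (out : String) : Prop := out = string_parse_alt strng
instance (strng : String) (out : String) : Decidable (Spec_string_parse strng out) := by unfold Spec_string_parse; infer_instance

-- ===== CLAIM (what is proved, stated in full; the proofs are below) =====
def Claim_equal_string_parse : Prop := ∀ (strng : String), Dom_string_parse strng → Spec_string_parse strng (string_parse strng)

-- ===== LEMMAS AND PROOFS =====
-- the part of a run of length k that B has emitted before the run's closing ']'
def runPrefix (c : Char) (k : Nat) : List Char :=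
  if k ≤ 2 then List.replicate k c
  else List.replicate 2 c ++ '[' :: List.replicate (k - 2) c

theorem fmtA_eq_runPrefix (c : Char) (k : Nat) :
    fmtA c k = runPrefix c k ++ (if 3 ≤ k then [']'] else []) := by
  unfold fmtA runPrefix
  by_cases h : k ≤ 2 <;> simp [h] <;> omega

theorem loopB_eq (cs : List Char) (c : Char) (k : Nat) (p3 p2 : Option Char)
    (hk : 1 ≤ k) (h2 : p2 = some c ↔ 2 ≤ k) (h3 : 2 ≤ k → (p3 = some c ↔ 3 ≤ k)) :
    loopA cs c k =
      runPrefix c k ++ (if 3 ≤ k ∧ cs.head? ≠ some c then [']'] else []) ++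
      loopB p3 p2 (some c) cs := by
  induction cs generalizing c k p3 p2 with
  | nil =>
    simp only [loopA, loopB, List.head?_nil, fmtA_eq_runPrefix]
    by_cases h : 3 ≤ k <;> simp [h]
  | cons x xs ih =>
    by_cases hx : x = c
    · subst hx
      simp only [loopA, beq_self_eq_true, if_pos, loopB, List.head?_cons]
      rw [ih x (k + 1) p2 (some x) (by omega)
            (by simp; omega)
            (fun _ => by rw [h2]; omega)]
      have hp2 : (p2 == some x) = decide (2 ≤ k) := by
        rcases Decidable.em (2 ≤ k) with h | h
        · simp [h2.mpr h, h]
        · have hne : p2 ≠ some x := fun hp => h (h2.mp hp)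
          simp [h, hne]
      simp only [Bool.true_and, hp2]
      have hpre : runPrefix x k ++
          ((if (decide (2 ≤ k) && p3 != some x) = true then ['['] else []) ++ [x]) =
          runPrefix x (k + 1) := by
        by_cases h : 2 ≤ k
        · by_cases h3' : 3 ≤ k
          · have : p3 = some x := (h3 h).mpr h3'
            simp only [h, decide_true, this, bne_self_eq_false, Bool.and_false,
              Bool.false_eq_true, if_neg, not_false_eq_true, List.nil_append]
            unfold runPrefix
            have hk2 : ¬ k ≤ 2 := by omega
            have hk2' : ¬ k + 1 ≤ 2 := by omega
            simp [hk2, hk2']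
            rw [show k - 1 = (k - 2) + 1 by omega, List.replicate_succ']
          · have hk2 : k = 2 := by omega
            subst hk2
            have : p3 ≠ some x := fun hp => h3' ((h3 (by omega)).mp hp)
            simp [this, runPrefix, List.replicate_succ]
        · have hk1 : k = 1 := by omega
          subst hk1
          simp only [show ¬ (2:Nat) ≤ 1 by omega, decide_false, Bool.false_and,
            Bool.false_eq_true, if_neg, not_false_eq_true, List.nil_append]
          unfold runPrefix
          simp [List.replicate_succ']
      have hclose : (if (decide (2 ≤ k) && xs.head? != some x) = true then [']'] else []) =
          (if 3 ≤ k + 1 ∧ xs.head? ≠ some x then [']'] else []) := by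
        by_cases h : 2 ≤ k <;> by_cases hh : xs.head? = some x <;>
          simp [h, hh]
      rw [hclose, ← hpre]
      simp
    · simp only [loopA, beq_iff_eq, hx, if_neg, not_false_eq_true, loopB, List.head?_cons]
      rw [ih x 1 p2 (some c) (by omega)
            (by simp [Ne.symm hx])
            (by omega)]
      have hthird : ((some c == some x && p2 == some x) : Bool) = false := by
        simp [Ne.symm hx]
      rw [hthird, fmtA_eq_runPrefix]
      simp [hx, runPrefix]

-- ===== VERDICT (by name: the statement is the Claim_ definition above) =====
theorem string_parse_spec : Claim_equal_string_parse := by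
  intro strng _
  unfold Spec_string_parse string_parse string_parse_alt
  cases h : strng.toList with
  | nil => simp [loopB]
  | cons x xs =>
    simp only [loopB]
    rw [loopB_eq xs x 1 none none (by omega) (by simp) (by omega)]
    simp [runPrefix]
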